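-- pv_equiv track=rewrite | github.com/mightachi/MasteringCodingInterview | python/striders_list_of_questions_dsa/dynamic_programming/dp_2d_or_3d/ninja_training.py | so_solve
-- ===== SOURCE A (Python) =====
-- def so_solve(n:int, points: list[list]) -> int:
-- 	prev = [0] * 4
-- 	prev[0] = max(points[0][1], points[0][2])
-- 	prev[1] = max(points[0][0], points[0][2])
-- 	prev[2] = max(points[0][0], points[0][1])
-- 	prev[3] = max(points[0][0], max(points[0][1], points[0][2]))
--
-- 	for day in range(1, n):
-- 		temp = [0] * 4
-- 		for last in range(4):
-- 			temp[last] = 0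
-- 			for task in range(3):
-- 				if last != task:
-- 					activity = points[day][task] + prev[task]
-- 					temp[last] = max(temp[last], activity)
-- 		prev = temp
-- 	return prev[3]
-- ===== SOURCE B (Python) =====
-- def so_solve(n: int, points: list[list]) -> int:
-- 	memo = {}
--
-- 	def best(day, last):
-- 		# best achievable through `day` when the next day's task is `last` (3 = none)
-- 		if (day, last) in memo:
-- 			return memo[(day, last)]
-- 		if day == 0:
-- 			v = max(points[0][t] for t in range(3) if t != last)
-- 		else:
-- 			v = 0  # A's recurrence floors each day (after day 0) at 0; kept for exactness
-- 			for t in range(3):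
-- 				if t != last:
-- 					v = max(v, points[day][t] + best(day - 1, t))
-- 		memo[(day, last)] = v
-- 		return v
--
-- 	return best(max(n - 1, 0), 3)
-- ===== Notes on version B (the rewrite author's own statement) =====
-- stated objective: alternative
-- what changed: Replaces A's bottom-up 4-state tabulation over all days with a top-down memoized recursion best(day,last) started at (max(n-1,0), 3).
import Mathlib
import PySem

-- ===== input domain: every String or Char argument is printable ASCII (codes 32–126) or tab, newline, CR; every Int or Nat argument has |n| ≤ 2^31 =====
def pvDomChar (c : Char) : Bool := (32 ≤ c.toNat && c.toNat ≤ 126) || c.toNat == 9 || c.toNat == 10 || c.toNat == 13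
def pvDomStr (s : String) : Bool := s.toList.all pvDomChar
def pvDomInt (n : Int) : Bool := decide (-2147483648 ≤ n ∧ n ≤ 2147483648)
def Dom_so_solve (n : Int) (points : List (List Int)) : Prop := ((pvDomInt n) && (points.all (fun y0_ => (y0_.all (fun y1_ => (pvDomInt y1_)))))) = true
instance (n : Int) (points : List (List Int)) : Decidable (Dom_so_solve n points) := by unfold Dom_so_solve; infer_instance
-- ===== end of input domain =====

-- B is a top-down memoized recursion on (day, last) of the same recurrence; equal return value (alternative decomposition, not claimed faster).

-- ===== PORT A =====
-- one iteration of A's `for day` body (the two inner loops, transcribed as folds over range 4 / range 3);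
-- list indexing is via getD: Pre_so_solve excludes exactly the inputs where Python's indexing raises IndexError
def soStep (points : List (List Int)) (prev : List Int) (day : Int) : List Int :=
  (List.range 4).map (fun last =>
    (List.range 3).foldl (fun acc task =>
      if last ≠ task then max acc ((points.getD day.toNat []).getD task 0 + prev.getD task 0) else acc) 0)

def so_solve (n : Int) (points : List (List Int)) : Int :=
  ((PySem.List.pyRange 1 n 1).foldl (soStep points)
    [max ((points.getD 0 []).getD 1 0) ((points.getD 0 []).getD 2 0),
     max ((points.getD 0 []).getD 0 0) ((points.getD 0 []).getD 2 0),
     max ((points.getD 0 []).getD 0 0) ((points.getD 0 []).getD 1 0),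
     max ((points.getD 0 []).getD 0 0) (max ((points.getD 0 []).getD 1 0) ((points.getD 0 []).getD 2 0))]).getD 3 0

-- ===== PORT B =====
-- Source B's best(day, last); the dict memoization is dropped (plain structural recursion computes the same values)
def soBest (points : List (List Int)) : Nat → Int → Int
  | 0, last =>
      ((PySem.List.max? ((List.range 3).filterMap
        (fun (t : Nat) => if (t : Int) ≠ last then some ((points.getD 0 []).getD t 0) else none)) (fun x => x)).getD 0)
  | d + 1, last =>
      (List.range 3).foldl (fun v (t : Nat) =>
        if (t : Int) ≠ last then max v ((points.getD (d + 1) []).getD t 0 + soBest points d t) else v) 0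

def so_solve_alt (n : Int) (points : List (List Int)) : Int :=
  soBest points (max (n - 1) 0).toNat 3

-- ===== PRECONDITION & SPEC =====
-- exactly the inputs where Python A returns: points nonempty, rows 0..max(n-1,0) exist and have ≥ 3 entries
def Pre_so_solve (n : Int) (points : List (List Int)) : Prop :=
  0 < points.length ∧ n ≤ (points.length : Int) ∧ ∀ row ∈ points.take (max n 1).toNat, 3 ≤ row.length
instance (n : Int) (points : List (List Int)) : Decidable (Pre_so_solve n points) := by unfold Pre_so_solve; infer_instance
def pvWitness_so_solve : Int × List (List Int) := (2, [[1, 2, 3], [4, 5, 6]])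

def Spec_so_solve (n : Int) (points : List (List Int)) (out : Int) : Prop := out = so_solve_alt n points
instance (n : Int) (points : List (List Int)) (out : Int) : Decidable (Spec_so_solve n points out) := by unfold Spec_so_solve; infer_instance

-- ===== CLAIM (what is proved, stated in full; the proofs are below) =====
def Claim_equal_so_solve : Prop := ∀ (n : Int) (points : List (List Int)), Dom_so_solve n points → Pre_so_solve n points → Spec_so_solve n points (so_solve n points)

-- ===== LEMMAS AND PROOFS =====

-- the folded loop state after k iterations is the vector of soBest values at day k
theorem soLoop_eq (points : List (List Int)) (k : Nat) :
    (((List.range k).map (fun j : Nat => (1 : Int) + (j : Int))).foldl (soStep points)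
      [max ((points.getD 0 []).getD 1 0) ((points.getD 0 []).getD 2 0),
       max ((points.getD 0 []).getD 0 0) ((points.getD 0 []).getD 2 0),
       max ((points.getD 0 []).getD 0 0) ((points.getD 0 []).getD 1 0),
       max ((points.getD 0 []).getD 0 0) (max ((points.getD 0 []).getD 1 0) ((points.getD 0 []).getD 2 0))])
    = [soBest points k 0, soBest points k 1, soBest points k 2, soBest points k 3] := by
  induction k with
  | zero =>
      simp [soBest, List.range, List.range.loop, PySem.List.max?_id_cons]
  | succ k ih =>
      rw [List.range_succ, List.map_append, List.foldl_append, ih]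
      simp only [List.map_cons, List.map_nil, List.foldl_cons, List.foldl_nil]
      have hday : ((1 : Int) + (k : Int)).toNat = k + 1 := by omega
      simp [soStep, soBest, List.range, List.range.loop, hday]

-- ===== VERDICT (by name: the statement is the Claim_ definition above) =====
theorem so_solve_spec : Claim_equal_so_solve := by
  intro n points _ _
  show so_solve n points = so_solve_alt n points
  unfold so_solve so_solve_alt
  rw [PySem.List.pyRange_one, soLoop_eq]
  have : (max (n - 1) 0).toNat = (n - 1).toNat := by omega
  rw [this]
  rfl
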